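-- pv_equiv track=rewrite | github.com/aqlan-hussin/ECE364 | Spring 2017/Prelab03/intro.py | getFormattedSSN
-- ===== SOURCE A (Python) =====
-- def getFormattedSSN(n):
-- 	a = [int(d) for d in str(n)]
-- 	length = len(a)
-- 	i = 0
-- 	while i < 9-length:
-- 		a.insert(0,0)
-- 		i = i+1
-- 	a.insert(3,'-')
-- 	a.insert(6,'-')
-- 	str1 = ''.join(str(e) for e in a)
-- 	return str1
-- ===== SOURCE B (Python) =====
-- def getFormattedSSN(n):
--     s = str(n).zfill(9)
--     return s[:3] + '-' + s[3:5] + '-' + s[5:]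
-- ===== Notes on version B (the rewrite author's own statement) =====
-- stated objective: idiomatic
-- what changed: Replaces the digit-list construction, the while-loop zero-padding and the two mutating list inserts plus join with a single str(n).zfill(9) and three fixed-offset slices concatenated with dashes.
import Mathlib
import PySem

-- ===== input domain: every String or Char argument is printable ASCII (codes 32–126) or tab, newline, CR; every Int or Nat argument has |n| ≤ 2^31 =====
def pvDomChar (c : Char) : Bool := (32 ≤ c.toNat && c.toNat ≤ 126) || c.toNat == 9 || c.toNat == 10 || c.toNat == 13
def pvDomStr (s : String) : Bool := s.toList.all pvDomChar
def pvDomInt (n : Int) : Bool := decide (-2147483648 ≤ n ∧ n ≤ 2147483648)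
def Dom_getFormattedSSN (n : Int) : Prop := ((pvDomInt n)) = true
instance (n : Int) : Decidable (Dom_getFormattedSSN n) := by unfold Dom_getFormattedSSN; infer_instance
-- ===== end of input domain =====

-- B formats via str(n).zfill(9) and fixed slices instead of A's digit list, while-loop padding and mutating inserts (idiomatic; Pre_ excludes negative n, where A raises ValueError).


-- ===== PORT A =====
-- Python's list `a` holds ints and (after the inserts) the two '-' strings; it is modelled
-- as List (Option Int): `some k` is the int k, `none` is the '-' string, and pvRenderA is
-- exactly the str(e) that the final join applies to each element.
def pvRenderA (e : Option Int) : String :=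
  match e with
  | some k => PySem.Int.toStr k
  | none => "-"

-- the `while i < 9-length: a.insert(0,0); i = i+1` loop (`length` is fixed before the loop)
def pvPadWhileA (a : List (Option Int)) (length : Int) (i : Int) : List (Option Int) :=
  if _h : i < 9 - length then pvPadWhileA (PySem.List.insert a 0 (some 0)) length (i + 1) else a
termination_by (9 - length - i).toNat
decreasing_by omega

def getFormattedSSN (n : Int) : String :=
  let a : List (Option Int) :=
    (PySem.Int.toChars n).map (fun d => some ((PySem.Int.ofChars? [d]).getD 0))
  let length := PySem.List.len a
  let a := pvPadWhileA a length 0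
  let a := PySem.List.insert a 3 none
  let a := PySem.List.insert a 6 none
  PySem.Str.join "" (a.map pvRenderA)

-- ===== PORT B =====
-- hand port of str.zfill(w) (PySem has no zfill): exact — pad with '0' on the left to width w,
-- keeping a leading '+'/'-' sign in front of the padding.
def pyZfill (cs : List Char) (w : Nat) : List Char :=
  if w ≤ cs.length then cs
  else match cs with
    | [] => List.replicate w '0'
    | c :: rest =>
      if c = '-' ∨ c = '+' then c :: (List.replicate (w - cs.length) '0' ++ rest)
      else List.replicate (w - cs.length) '0' ++ cs

def getFormattedSSN_alt (n : Int) : String :=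
  let s := pyZfill (PySem.Int.toChars n) 9
  String.ofList (PySem.List.slice s none (some 3) ++
    '-' :: (PySem.List.slice s (some 3) (some 5) ++
    '-' :: PySem.List.slice s (some 5) none))

-- ===== PRECONDITION & SPEC =====
-- Pre_ excludes negative n: there str(n) starts with a minus sign and A's int(d) raises ValueError.
def Pre_getFormattedSSN (n : Int) : Prop := 0 ≤ n
instance (n : Int) : Decidable (Pre_getFormattedSSN n) := by unfold Pre_getFormattedSSN; infer_instance
def pvWitness_getFormattedSSN : Int := (123456789)

def Spec_getFormattedSSN (n : Int) (out : String) : Prop := out = getFormattedSSN_alt n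
instance (n : Int) (out : String) : Decidable (Spec_getFormattedSSN n out) := by unfold Spec_getFormattedSSN; infer_instance

-- ===== CLAIM (what is proved, stated in full; the proofs are below) =====
def Claim_equal_getFormattedSSN : Prop := ∀ (n : Int), Dom_getFormattedSSN n → Pre_getFormattedSSN n → Spec_getFormattedSSN n (getFormattedSSN n)

-- ===== LEMMAS AND PROOFS =====

-- every character Nat.toDigitsCore emits is a digitChar of a remainder < 10
lemma pvToDigitsCore_chars : ∀ (f n : Nat) (acc : List Char) (c : Char),
    c ∈ Nat.toDigitsCore 10 f n acc → (∃ r, r < 10 ∧ c = Nat.digitChar r) ∨ c ∈ acc := by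
  intro f
  induction f with
  | zero => intro n acc c h; exact Or.inr h
  | succ f ih =>
    intro n acc c h
    rw [Nat.toDigitsCore] at h
    by_cases hd : n / 10 = 0
    · simp only [hd, if_true] at h
      rcases List.mem_cons.mp h with he | hm
      · exact Or.inl ⟨n % 10, Nat.mod_lt _ (by omega), he⟩
      · exact Or.inr hm
    · simp only [hd, if_false] at h
      rcases ih _ _ _ h with hr | hm
      · exact Or.inl hr
      · rcases List.mem_cons.mp hm with he | hm2
        · exact Or.inl ⟨n % 10, Nat.mod_lt _ (by omega), he⟩
        · exact Or.inr hm2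

lemma pvToDigitsCore_ne_nil : ∀ (f n : Nat) (acc : List Char), 0 < f ∨ acc ≠ [] →
    Nat.toDigitsCore 10 f n acc ≠ [] := by
  intro f
  induction f with
  | zero =>
    intro n acc h
    rcases h with h | h
    · omega
    · simpa [Nat.toDigitsCore] using h
  | succ f ih =>
    intro n acc _
    rw [Nat.toDigitsCore]
    by_cases hd : n / 10 = 0
    · simp [hd]
    · simp only [hd, if_false]
      exact ih _ _ (Or.inr (by simp))

lemma pvToDigits_ne_nil (m : Nat) : Nat.toDigits 10 m ≠ [] :=
  pvToDigitsCore_ne_nil _ _ _ (Or.inl (by omega))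

lemma pvToDigits_chars (m : Nat) (c : Char) (h : c ∈ Nat.toDigits 10 m) :
    ∃ r, r < 10 ∧ c = Nat.digitChar r := by
  rcases pvToDigitsCore_chars _ _ _ _ h with hr | hm
  · exact hr
  · cases hm

-- str(int(str(d))) is str(d) again, for a single decimal digit d
lemma pvRoundtrip (r : Nat) (h : r < 10) :
    PySem.Int.toStr ((PySem.Int.ofChars? [Nat.digitChar r]).getD 0) = String.ofList [Nat.digitChar r] := by
  interval_cases r <;> decide

lemma pvDigitChar_not_sign (r : Nat) (h : r < 10) :
    ¬ (Nat.digitChar r = '-' ∨ Nat.digitChar r = '+') := by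
  interval_cases r <;> decide

-- the while loop prepends (9 - length - i).toNat zeros
lemma pvPadWhileA_eq : ∀ (k : Nat) (a : List (Option Int)) (L i : Int), (9 - L - i).toNat = k →
    pvPadWhileA a L i = List.replicate k (some 0) ++ a := by
  intro k
  induction k with
  | zero =>
    intro a L i hk
    rw [pvPadWhileA]
    simp only [show ¬ i < 9 - L by omega, dite_false]
    simp
  | succ k ih =>
    intro a L i hk
    rw [pvPadWhileA]
    simp only [show i < 9 - L by omega, dite_true]
    rw [ih _ L (i + 1) (by omega), PySem.List.insert_zero]
    rw [List.replicate_succ']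
    simp

-- ''.join(parts) is the concatenation of the parts
lemma pvJoinEmpty (parts : List String) :
    PySem.Str.join "" parts = String.ofList ((parts.map String.toList).flatten) := by
  have h : ∀ (xss : List (List Char)), List.intercalate [] xss = xss.flatten := by
    intro xss
    induction xss with
    | nil => rfl
    | cons x xs ih =>
      cases xs with
      | nil => simp [List.intercalate]
      | cons y ys =>
        simp only [List.intercalate] at ih ⊢
        simp only [List.intersperse, List.flatten] at ih ⊢
        simp [ih]
  simp [PySem.Str.join, PySem.Chars.join, h]

lemma pvFlattenSingleton (l : List Char) : (l.map (fun c => [c])).flatten = l := by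
  induction l with
  | nil => rfl
  | cons x xs ih => simp [ih]

-- the heart of the proof: for any nonempty list of decimal-digit characters ds,
-- A's pad/insert/join pipeline equals B's zfill-and-slice pipeline
lemma pvCore (ds : List Char) (hne : ds ≠ [])
    (hdig : ∀ c ∈ ds, ∃ r, r < 10 ∧ c = Nat.digitChar r) :
    PySem.Str.join "" ((PySem.List.insert (PySem.List.insert
        (pvPadWhileA (ds.map (fun d => some ((PySem.Int.ofChars? [d]).getD 0)))
          (PySem.List.len (ds.map (fun d => some ((PySem.Int.ofChars? [d]).getD 0)))) 0)
        3 none) 6 none).map pvRenderA)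
    = String.ofList (PySem.List.slice (pyZfill ds 9) none (some 3) ++
        '-' :: (PySem.List.slice (pyZfill ds 9) (some 3) (some 5) ++
        '-' :: PySem.List.slice (pyZfill ds 9) (some 5) none)) := by
  have hL1 : 1 ≤ ds.length := by
    cases ds with
    | nil => exact absurd rfl hne
    | cons c rest => simp
  -- zfill prepends 9 - len zeros (the head is a digit, not a sign)
  have hzfill : pyZfill ds 9 = List.replicate (9 - ds.length) '0' ++ ds := by
    by_cases h9 : 9 ≤ ds.length
    · rw [pyZfill.eq_def, if_pos h9, Nat.sub_eq_zero_of_le h9]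
      simp
    · cases ds with
      | nil => exact absurd rfl hne
      | cons c rest =>
        rcases hdig c (by simp) with ⟨r, hr, he⟩
        rw [pyZfill.eq_def]
        simp only [h9, if_false]
        rw [if_neg (he ▸ pvDigitChar_not_sign r hr)]
  set t := pyZfill ds 9 with ht
  have htlen : 9 ≤ t.length := by
    rw [hzfill]
    simp only [List.length_append, List.length_replicate]
    omega
  have hpad : pvPadWhileA (ds.map (fun d => some ((PySem.Int.ofChars? [d]).getD 0)))
      (PySem.List.len (ds.map (fun d => some ((PySem.Int.ofChars? [d]).getD 0)))) 0
      = List.replicate (9 - ds.length) (some 0) ++ ds.map (fun d => some ((PySem.Int.ofChars? [d]).getD 0)) := by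
    apply pvPadWhileA_eq
    rw [PySem.List.len_eq]
    simp only [List.length_map]
    omega
  set a2 := List.replicate (9 - ds.length) (some (0:Int)) ++
      ds.map (fun d => some ((PySem.Int.ofChars? [d]).getD 0)) with ha2
  have ha2len : a2.length = 9 - ds.length + ds.length := by
    simp [ha2]
  -- each element of a2 renders to the corresponding character of t
  have hM : a2.map (fun e => (pvRenderA e).toList) = t.map (fun c => [c]) := by
    rw [ha2, hzfill]
    simp only [List.map_append, List.map_map, List.map_replicate]
    refine congrArg₂ (· ++ ·) ?_ ?_
    · rw [show ((pvRenderA (some (0:Int))).toList) = ['0'] from by decide]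
    · apply List.map_congr_left
      intro c hc
      rcases hdig c hc with ⟨r, hr, he⟩
      subst he
      simp only [Function.comp_apply, pvRenderA]
      rw [pvRoundtrip r hr]
      simp
  rw [hpad]
  rw [PySem.List.insert_ofNat a2 3 none (by omega)]
  rw [PySem.List.insert_ofNat _ 6 none (by
    simp only [List.length_append, List.length_cons, List.length_take, List.length_drop]
    omega)]
  rw [pvJoinEmpty]
  have hmap : ∀ (l : List (Option Int)), (l.map pvRenderA).map String.toList
      = l.map (fun e => (pvRenderA e).toList) := by
    intro l; rw [List.map_map]; rfl
  have htk3 : (a2.take 3).length = 3 := by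
    simp only [List.length_take]
    omega
  have e1 : List.take 6 (List.take 3 a2 ++ none :: List.drop 3 a2)
      = List.take 3 a2 ++ none :: List.take 2 (List.drop 3 a2) := by
    rw [List.take_append, htk3]
    simp [List.take_take]
  have e2 : List.drop 6 (List.take 3 a2 ++ none :: List.drop 3 a2)
      = List.drop 2 (List.drop 3 a2) := by
    rw [List.drop_append, htk3, List.drop_eq_nil_of_le (by omega : (List.take 3 a2).length ≤ 6)]
    simp
  rw [e1, e2]
  congr 1
  rw [hmap]
  have f1 : (List.take 3 a2).map (fun e => (pvRenderA e).toList)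
      = (t.take 3).map (fun c => [c]) := by
    rw [List.map_take, hM, ← List.map_take]
  have f2 : (List.take 2 (List.drop 3 a2)).map (fun e => (pvRenderA e).toList)
      = ((t.drop 3).take 2).map (fun c => [c]) := by
    rw [List.map_take, List.map_drop, hM, ← List.map_drop, ← List.map_take]
  have f3 : (List.drop 2 (List.drop 3 a2)).map (fun e => (pvRenderA e).toList)
      = (t.drop 5).map (fun c => [c]) := by
    rw [List.map_drop, List.map_drop, hM, ← List.map_drop, ← List.map_drop, List.drop_drop]
  simp only [List.map_append, List.map_cons]
  rw [f1, f2, f3]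
  simp only [List.flatten_append, List.flatten_cons]
  rw [pvFlattenSingleton, pvFlattenSingleton, pvFlattenSingleton]
  have hs1 : PySem.List.slice t none (some 3) = t.take 3 := by simp [pysem]
  have hs2 : PySem.List.slice t (some 3) (some 5) = (t.drop 3).take 2 := by simp [pysem]
  have hs3 : PySem.List.slice t (some 5) none = t.drop 5 := by simp [pysem]
  rw [hs1, hs2, hs3]
  simp [pvRenderA]

-- ===== VERDICT (by name: the statement is the Claim_ definition above) =====
theorem getFormattedSSN_spec : Claim_equal_getFormattedSSN := by
  intro n _ hpre
  have h0 : (0:Int) ≤ n := hpre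
  unfold Spec_getFormattedSSN getFormattedSSN getFormattedSSN_alt
  have hds : PySem.Int.toChars n = Nat.toDigits 10 n.toNat := by
    simp [PySem.Int.toChars, show ¬ n < 0 by omega]
  rw [hds]
  exact pvCore _ (pvToDigits_ne_nil _) (fun c hc => pvToDigits_chars _ _ hc)
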